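-- pv_equiv track=rewrite | github.com/LukasNatanael/Notes | core/Limpar.py | personalizado
-- ===== SOURCE A (Python) =====
-- import string
--
-- def personalizado(texto: str, remover_digitos: bool = False, remover_letras: bool = False, remover_especiais: bool = False, remover_espacos: bool = False, remover_quebras: bool = False, strict: bool = False) -> str:
--     """
--     Remove partes específicas do texto conforme parâmetros.
--
--     Args:
--         texto: texto de entrada
--         remover_digitos: remove números (0-9)
--         remover_letras: remove letras (a-zA-Z)
--         remover_especiais: remove pontuação e símbolos
--         remover_espacos: remove espaços simples ( )
--         remover_quebras: remove \n, \r e tabs (\t)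
--
--     Returns:
--         Texto modificado
--     """
--     resultado = texto
--
--
--     if strict:
--         # Apenas letras e dígitos
--         resultado = ''.join([c for c in resultado if c.isalnum()])
--         return resultado
--
--     if remover_digitos:
--         resultado = ''.join([c for c in resultado if not c.isdigit()])
--
--     if remover_letras:
--         resultado = ''.join([c for c in resultado if not c.isalpha()])
--
--     if remover_especiais:
--         permitidos = string.ascii_letters + string.digits + ' \n\r\t'
--         resultado = ''.join([c for c in resultado if c in permitidos])
--
--     if remover_espacos:
--         resultado = resultado.replace(' ', '')
--
--     if remover_quebras:
--         resultado = resultado.replace('\n', '').replace('\r', '').replace('\t', '')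
--
--     return resultado
-- ===== SOURCE B (Python) =====
-- import string
--
-- def personalizado(texto: str, remover_digitos: bool = False, remover_letras: bool = False, remover_especiais: bool = False, remover_espacos: bool = False, remover_quebras: bool = False, strict: bool = False) -> str:
--     """Single-pass re-implementation: one combined predicate instead of five sequential filtering passes."""
--     if strict:
--         return ''.join(c for c in texto if c.isalnum())
--     permitidos = string.ascii_letters + string.digits + ' \n\r\t'
--     return ''.join(
--         c for c in texto
--         if not (remover_digitos and c.isdigit())
--         and not (remover_letras and c.isalpha())
--         and not (remover_especiais and c not in permitidos)
--         and not (remover_espacos and c == ' ')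
--         and not (remover_quebras and c in '\n\r\t')
--     )
-- ===== Notes on version B (the rewrite author's own statement) =====
-- stated objective: simpler
-- what changed: Replaces A's five sequential whole-string filtering passes (two comprehensions and four str.replace calls) with a single pass over the text using one combined per-character predicate; the strict branch is kept.
import Mathlib
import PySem

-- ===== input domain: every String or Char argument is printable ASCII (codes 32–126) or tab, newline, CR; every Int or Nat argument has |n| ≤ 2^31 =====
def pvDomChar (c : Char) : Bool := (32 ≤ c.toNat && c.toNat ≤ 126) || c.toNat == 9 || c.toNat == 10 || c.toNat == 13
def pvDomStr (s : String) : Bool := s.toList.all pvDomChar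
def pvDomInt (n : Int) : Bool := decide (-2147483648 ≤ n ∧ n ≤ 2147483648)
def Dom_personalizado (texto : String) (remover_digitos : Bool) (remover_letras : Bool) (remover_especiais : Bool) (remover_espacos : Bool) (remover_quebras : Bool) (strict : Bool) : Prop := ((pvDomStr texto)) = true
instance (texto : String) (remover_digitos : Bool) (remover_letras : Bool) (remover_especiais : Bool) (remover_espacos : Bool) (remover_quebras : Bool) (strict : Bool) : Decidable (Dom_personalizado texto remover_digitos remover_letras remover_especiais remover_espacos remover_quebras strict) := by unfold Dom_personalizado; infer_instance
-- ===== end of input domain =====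

-- B replaces A's five sequential whole-string filtering passes with a single pass using one combined per-character predicate (objective: simpler); same return value on all inputs.
-- ===== PORT A =====
def personalizado (texto : String) (remover_digitos : Bool) (remover_letras : Bool) (remover_especiais : Bool) (remover_espacos : Bool) (remover_quebras : Bool) (strict : Bool) : String :=
  let resultado := texto
  if strict then
    String.ofList (resultado.toList.filter (fun c => PySem.Chars.isalnum c))
  else
    let resultado := if remover_digitos then String.ofList (resultado.toList.filter (fun c => !PySem.Chars.isdigit c)) else resultado
    let resultado := if remover_letras then String.ofList (resultado.toList.filter (fun c => !PySem.Chars.isalpha c)) else resultado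
    let resultado := if remover_especiais then
        let permitidos := "abcdefghijklmnopqrstuvwxyzABCDEFGHIJKLMNOPQRSTUVWXYZ" ++ "0123456789" ++ " \n\r\t"
        String.ofList (resultado.toList.filter (fun c => PySem.Str.isIn (String.ofList [c]) permitidos))
      else resultado
    let resultado := if remover_espacos then PySem.Str.replace resultado " " "" else resultado
    let resultado := if remover_quebras then PySem.Str.replace (PySem.Str.replace (PySem.Str.replace resultado "\n" "") "\r" "") "\t" "" else resultado
    resultado

-- ===== PORT B =====
-- one pass over the text with a single combined predicate (B's structure)
def personalizado_alt (texto : String) (remover_digitos : Bool) (remover_letras : Bool) (remover_especiais : Bool) (remover_espacos : Bool) (remover_quebras : Bool) (strict : Bool) : String :=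
  if strict then
    String.ofList (texto.toList.filter (fun c => PySem.Chars.isalnum c))
  else
    let permitidos := "abcdefghijklmnopqrstuvwxyzABCDEFGHIJKLMNOPQRSTUVWXYZ" ++ "0123456789" ++ " \n\r\t"
    String.ofList (texto.toList.filter (fun c =>
      !(remover_digitos && PySem.Chars.isdigit c) &&
      !(remover_letras && PySem.Chars.isalpha c) &&
      !(remover_especiais && !(PySem.Str.isIn (String.ofList [c]) permitidos)) &&
      !(remover_espacos && (c == ' ')) &&
      !(remover_quebras && PySem.Str.isIn (String.ofList [c]) "\n\r\t")))
-- ===== PRECONDITION & SPEC =====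
def Spec_personalizado (texto : String) (remover_digitos : Bool) (remover_letras : Bool) (remover_especiais : Bool) (remover_espacos : Bool) (remover_quebras : Bool) (strict : Bool) (out : String) : Prop := out = personalizado_alt texto remover_digitos remover_letras remover_especiais remover_espacos remover_quebras strict
instance (texto : String) (remover_digitos : Bool) (remover_letras : Bool) (remover_especiais : Bool) (remover_espacos : Bool) (remover_quebras : Bool) (strict : Bool) (out : String) : Decidable (Spec_personalizado texto remover_digitos remover_letras remover_especiais remover_espacos remover_quebras strict out) := by unfold Spec_personalizado; infer_instance

-- ===== CLAIM (what is proved, stated in full; the proofs are below) =====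
def Claim_equal_personalizado : Prop := ∀ (texto : String) (remover_digitos : Bool) (remover_letras : Bool) (remover_especiais : Bool) (remover_espacos : Bool) (remover_quebras : Bool) (strict : Bool), Dom_personalizado texto remover_digitos remover_letras remover_especiais remover_espacos remover_quebras strict → Spec_personalizado texto remover_digitos remover_letras remover_especiais remover_espacos remover_quebras strict (personalizado texto remover_digitos remover_letras remover_especiais remover_espacos remover_quebras strict)

-- ===== LEMMAS AND PROOFS =====

theorem pv_go_single (c : Char) : ∀ (l acc : List Char) (fuel : Nat), l.length ≤ fuel →
    PySem.Chars.replace.go [c] [] fuel l acc = acc.reverse ++ l.filter (fun x => x != c) := by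
  intro l
  induction l with
  | nil => intro acc fuel h; cases fuel <;> simp [PySem.Chars.replace.go]
  | cons a t ih =>
    intro acc fuel h
    cases fuel with
    | zero => simp at h
    | succ f =>
      by_cases hac : a = c
      · subst hac
        have hpre : List.isPrefixOf [a] (a :: t) = true := by simp [List.isPrefixOf]
        simp only [PySem.Chars.replace.go, hpre, if_pos, List.length_cons, List.length_nil,
          List.drop_succ_cons, List.drop_zero, List.reverse_nil, List.nil_append]
        rw [ih]
        · simp
        · simpa using h
      · have hpre : List.isPrefixOf [c] (a :: t) = false := by
          simp [List.isPrefixOf]; exact fun hc => absurd hc.symm hac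
        simp only [PySem.Chars.replace.go, hpre, Bool.false_eq_true, if_false]
        rw [ih]
        · simp [hac, bne]
        · simpa using h

theorem pv_replace_single (s : List Char) (c : Char) :
    PySem.Chars.replace s [c] [] = s.filter (fun x => x != c) := by
  rw [PySem.Chars.replace]
  simp [pv_go_single c s [] s.length (le_refl _)]

theorem pv_isIn_single (c : Char) (s : List Char) :
    PySem.Chars.isIn [c] s = s.contains c := by
  rcases h : PySem.Chars.isIn [c] s with _ | _
  · have := (PySem.Chars.isIn_eq_false_iff _ _).mp h
    symm
    simp only [List.contains_eq_mem, decide_eq_false_iff_not]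
    intro hm
    exact this (List.infix_iff_prefix_suffix.mpr (by
      obtain ⟨p, q, rfl⟩ := List.mem_iff_append.mp hm
      exact ⟨[c] ++ q, ⟨List.prefix_append _ _, by simp⟩⟩))
  · have := (PySem.Chars.isIn_iff_infix _ _).mp h
    symm
    simp only [List.contains_eq_mem, decide_eq_true_eq]
    exact this.mem (by simp)

theorem pv_contains_nlrt (c : Char) :
    ("\n\r\t".toList.contains c) = (c == '\n' || (c == '\r' || c == '\t')) := by
  have h : "\n\r\t".toList = ['\n', '\r', '\t'] := by decide
  rw [h]
  simp only [List.contains_cons, List.contains_nil, Bool.or_false]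

-- ===== VERDICT (by name: the statement is the Claim_ definition above) =====
set_option maxHeartbeats 1000000 in
theorem personalizado_spec : Claim_equal_personalizado := by
  intro texto d l e sp q strict _
  show personalizado texto d l e sp q strict = personalizado_alt texto d l e sp q strict
  cases strict
  case true => rfl
  case false =>
    cases d <;> cases l <;> cases e <;> cases sp <;> cases q <;>
      first
      | (simp only [personalizado, personalizado_alt, PySem.Str.replace, PySem.Str.isIn,
           Bool.false_eq_true, if_true, if_false, String.toList_ofList,
           show (" " : String).toList = [' '] from by decide,
           show ("\n" : String).toList = ['\n'] from by decide,
           show ("\r" : String).toList = ['\r'] from by decide,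
           show ("\t" : String).toList = ['\t'] from by decide,
           show ("" : String).toList = [] from by decide,
           pv_replace_single, pv_isIn_single]
         refine congrArg String.ofList ?_
         try simp only [List.filter_filter]
         refine List.filter_congr fun c _ => ?_
         try simp only [bne, pv_contains_nlrt]
         generalize ("abcdefghijklmnopqrstuvwxyzABCDEFGHIJKLMNOPQRSTUVWXYZ" ++ "0123456789" ++
           " \n\r\t").toList.contains c = p
         generalize PySem.Chars.isdigit c = b1
         generalize PySem.Chars.isalpha c = b2
         generalize (c == ' ') = b3
         generalize (c == '\n') = b4
         generalize (c == '\r') = b5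
         generalize (c == '\t') = b6
         revert p b1 b2 b3 b4 b5 b6
         decide)
      | simp [personalizado, personalizado_alt, String.ofList_toList]
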